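-- pv_equiv track=rewrite | github.com/nthhcmus/DataStructure-Algorithms | Number_Theory/029 Palindrome and Loc_phat.py | check
-- ===== SOURCE A (Python) =====
-- def check(n):
--     temp = n
--     rev = 0
--     sum = 0
--     flag_6 = False
--     last_digit = 0
--     while temp > 0:
--         last_digit = temp % 10
--         rev = rev*10 + last_digit
--         sum += last_digit
--         if last_digit == 6:
--             flag_6 = True
--         temp //= 10
--     return flag_6 and sum % 10 == 8 and rev == n
-- ===== SOURCE B (Python) =====
-- def check(n):
--     if n <= 0:
--         return False
--     s = str(n)
--     return '6' in s and sum(map(int, s)) % 10 == 8 and s == s[::-1]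
-- ===== Notes on version B (the rewrite author's own statement) =====
-- stated objective: idiomatic
-- what changed: B tests the three properties on the decimal string str(n) (substring membership of the digit six, a sum over the characters, equality with the slice-reversed string) instead of A's arithmetic mod/div loop maintaining a reversal accumulator, a running sum and a flag.
import Mathlib
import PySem

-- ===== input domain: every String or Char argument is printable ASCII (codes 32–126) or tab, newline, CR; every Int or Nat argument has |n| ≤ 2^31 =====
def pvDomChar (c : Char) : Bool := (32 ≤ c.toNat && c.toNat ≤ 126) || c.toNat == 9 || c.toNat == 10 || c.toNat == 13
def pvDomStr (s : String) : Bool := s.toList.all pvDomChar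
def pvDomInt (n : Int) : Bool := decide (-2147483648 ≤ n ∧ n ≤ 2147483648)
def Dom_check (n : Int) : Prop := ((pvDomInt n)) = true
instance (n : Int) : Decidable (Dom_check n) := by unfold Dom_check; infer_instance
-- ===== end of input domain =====

-- B checks the three properties on the decimal string str(n) — '6' in s, digit-char sum,
-- s == s[::-1] — instead of A's arithmetic mod/div loop with reversal/sum/flag accumulators;
-- more idiomatic, same O(d) cost.

-- ===== PORT A =====
-- the while loop: state (temp, rev, sum, flag_6); branches in Python order
def checkLoop (temp rev sum : Int) (flag6 : Bool) : Int × Int × Bool :=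
  if h : temp > 0 then
    let last_digit := PySem.Int.mod temp 10
    checkLoop (PySem.Int.floordiv temp 10) (rev * 10 + last_digit) (sum + last_digit)
      (if last_digit == 6 then true else flag6)
  else (rev, sum, flag6)
termination_by temp.toNat
decreasing_by
  have h10 : PySem.Int.floordiv temp 10 = temp / 10 := by
    simp [PySem.Int.floordiv, Int.fdiv_eq_ediv]
  rw [h10]
  omega

def check (n : Int) : Bool :=
  let st := checkLoop n 0 0 false
  st.2.2 && (PySem.Int.mod st.2.1 10 == 8) && (st.1 == n)

-- ===== PORT B =====
def check_alt (n : Int) : Bool :=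
  if n ≤ 0 then false
  else
    let cs := PySem.Int.toChars n          -- s = str(n), as characters
    -- '6' in s
    PySem.Chars.isIn ['6'] cs &&
    -- sum(map(int, s)) % 10 == 8; int(c) on a decimal-digit char is ord(c) - 48,
    -- exact here since str(n) for n > 0 consists of digit characters only
    (PySem.Int.mod (cs.map (fun c => ((c.toNat : Int) - 48))).sum 10 == 8) &&
    -- s == s[::-1]: slice with step -1 is reverse (PySem.Chars.slice?_none_none_neg_one)
    (cs == cs.reverse)

-- ===== PRECONDITION & SPEC =====
def Spec_check (n : Int) (out : Bool) : Prop := out = check_alt n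
instance (n : Int) (out : Bool) : Decidable (Spec_check n out) := by unfold Spec_check; infer_instance

-- ===== CLAIM (what is proved, stated in full; the proofs are below) =====
def Claim_equal_check : Prop := ∀ (n : Int), Dom_check n → Spec_check n (check n)

-- ===== LEMMAS AND PROOFS =====

-- least-significant-first decimal digits of a Nat
def dNat (m : Nat) : List Nat :=
  if m = 0 then [] else m % 10 :: dNat (m / 10)
decreasing_by exact Nat.div_lt_self (by omega) (by norm_num)

theorem dNat_lt (m : Nat) : ∀ d ∈ dNat m, d < 10 := by
  induction m using dNat.induct with
  | case1 => simp [dNat]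
  | case2 m hm ih =>
      rw [dNat, if_neg hm]
      intro d hd
      rcases List.mem_cons.mp hd with h | h
      · subst h; exact Nat.mod_lt m (by norm_num)
      · exact ih d h

-- A's result characterized via dNat ------------------------------------------------

def pvVal (ds : List Nat) : Int := ds.foldr (fun d acc => (d : Int) + 10 * acc) 0

theorem pvVal_cons (d : Nat) (ds : List Nat) : pvVal (d :: ds) = (d : Int) + 10 * pvVal ds := rfl

theorem pvVal_append_singleton (ds : List Nat) (d : Nat) :
    pvVal (ds ++ [d]) = pvVal ds + (d : Int) * 10 ^ ds.length := by
  induction ds with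
  | nil => simp [pvVal]
  | cons x xs ih =>
      simp only [List.cons_append, pvVal_cons, ih, List.length_cons]
      ring

theorem dNat_val (m : Nat) : pvVal (dNat m) = (m : Int) := by
  induction m using dNat.induct with
  | case1 => simp [dNat, pvVal]
  | case2 m hm ih =>
      rw [dNat, if_neg hm, pvVal_cons, ih]
      push_cast
      omega

theorem pvVal_inj (ds1 ds2 : List Nat) (hlen : ds1.length = ds2.length)
    (h1 : ∀ d ∈ ds1, d < 10) (h2 : ∀ d ∈ ds2, d < 10)
    (hv : pvVal ds1 = pvVal ds2) : ds1 = ds2 := by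
  induction ds1 generalizing ds2 with
  | nil => cases ds2 with
      | nil => rfl
      | cons y ys => simp at hlen
  | cons x xs ih =>
      cases ds2 with
      | nil => simp at hlen
      | cons y ys =>
          simp only [pvVal_cons] at hv
          have hx := h1 x (List.mem_cons_self)
          have hy := h2 y (List.mem_cons_self)
          have hxy : (x : Int) = y ∧ pvVal xs = pvVal ys := by
            constructor <;> [omega; omega]
          have hxy1 : x = y := by exact_mod_cast hxy.1
          have := ih ys (by simpa using hlen) (fun d hd => h1 d (List.mem_cons_of_mem _ hd))
            (fun d hd => h2 d (List.mem_cons_of_mem _ hd)) hxy.2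
          rw [hxy1, this]

theorem foldl_rev_eq (ds : List Nat) (rev : Int) :
    ds.foldl (fun (r : Int) (d : Nat) => r * 10 + (d : Int)) rev = rev * 10 ^ ds.length + pvVal ds.reverse := by
  induction ds generalizing rev with
  | nil => simp [pvVal]
  | cons d ds ih =>
      simp only [List.foldl_cons, ih, List.reverse_cons, pvVal_append_singleton,
        List.length_reverse, List.length_cons]
      ring

theorem pyMod_natCast (m : Nat) : PySem.Int.mod (m : Int) 10 = ((m % 10 : Nat) : Int) := by
  simp [PySem.Int.mod, Int.fmod_eq_emod]

theorem pyFloordiv_natCast (m : Nat) : PySem.Int.floordiv (m : Int) 10 = ((m / 10 : Nat) : Int) := by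
  simp [PySem.Int.floordiv, Int.fdiv_eq_ediv]

-- A's loop, run on a nonnegative value, computed from the digit list
theorem checkLoop_eq (m : Nat) (rev sum : Int) (flag : Bool) :
    checkLoop (m : Int) rev sum flag =
      ((dNat m).foldl (fun (r : Int) (d : Nat) => r * 10 + (d : Int)) rev,
       sum + ((dNat m).map (fun (d : Nat) => (d : Int))).sum,
       flag || decide (6 ∈ dNat m)) := by
  induction m using dNat.induct generalizing rev sum flag with
  | case1 =>
      rw [checkLoop, dNat]
      simp
  | case2 m hm ih =>
      rw [checkLoop, dNat, if_neg hm]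
      have hpos : ((m : Int) > 0) := by exact_mod_cast Nat.pos_of_ne_zero hm
      rw [dif_pos hpos]
      simp only [pyMod_natCast, pyFloordiv_natCast, ih]
      refine Prod.ext ?_ (Prod.ext ?_ ?_)
      · simp [List.foldl_cons]
      · simp only [List.map_cons, List.sum_cons]; ring
      · by_cases h : m % 10 = 6
        · simp [h, List.mem_cons]
        · have h2 : ¬ (6 = m % 10) := fun he => h he.symm
          have h3 : ¬ ((m : Int) % 10 = 6) := by omega
          simp [List.mem_cons, h2, h3]

theorem checkLoop_nonpos (n : Int) (h : ¬ n > 0) : checkLoop n 0 0 false = (0, 0, false) := by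
  rw [checkLoop, dif_neg h]

-- B's string characterized via dNat ------------------------------------------------

theorem toDigitsCore_eq (fuel : Nat) : ∀ (n : Nat) (ds : List Char), 0 < n → n < fuel →
    Nat.toDigitsCore 10 fuel n ds = (dNat n).reverse.map Nat.digitChar ++ ds := by
  induction fuel with
  | zero => intro n ds hn hf; omega
  | succ fuel ih =>
      intro n ds hn hf
      rw [Nat.toDigitsCore]
      by_cases h : n / 10 = 0
      · have hlt : n < 10 := by omega
        rw [if_pos h, dNat, if_neg (by omega), dNat, if_pos h]
        simp [Nat.mod_eq_of_lt hlt]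
      · rw [if_neg h]
        rw [ih (n / 10) _ (Nat.pos_of_ne_zero h) (by omega)]
        conv_rhs => rw [dNat, if_neg (by omega : ¬ n = 0)]
        simp

theorem toChars_pos (m : Nat) (hm : 0 < m) :
    PySem.Int.toChars (m : Int) = (dNat m).reverse.map Nat.digitChar := by
  have h1 : ¬ ((m : Int) < 0) := by omega
  rw [PySem.Int.toChars, if_neg h1, Int.toNat_natCast, Nat.toDigits,
    toDigitsCore_eq (m + 1) m [] hm (by omega)]
  simp

-- digitChar facts on actual digits
theorem digitChar_toNat (d : Nat) (hd : d < 10) : (Nat.digitChar d).toNat = 48 + d := by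
  interval_cases d <;> decide

theorem digitChar_eq_six (d : Nat) (hd : d < 10) : (Nat.digitChar d = '6') ↔ d = 6 := by
  interval_cases d <;> decide

theorem map_digitChar_inj (xs ys : List Nat) (hx : ∀ d ∈ xs, d < 10) (hy : ∀ d ∈ ys, d < 10)
    (h : xs.map Nat.digitChar = ys.map Nat.digitChar) : xs = ys := by
  induction xs generalizing ys with
  | nil => cases ys with
      | nil => rfl
      | cons y ys => simp at h
  | cons x xs ih =>
      cases ys with
      | nil => simp at h
      | cons y ys =>
          simp only [List.map_cons, List.cons.injEq] at h
          have hx0 := hx x List.mem_cons_self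
          have hy0 := hy y List.mem_cons_self
          have hxy : x = y := by
            have ht := congrArg Char.toNat h.1
            rw [digitChar_toNat x hx0, digitChar_toNat y hy0] at ht
            omega
          rw [hxy, ih ys (fun d hd => hx d (List.mem_cons_of_mem _ hd))
            (fun d hd => hy d (List.mem_cons_of_mem _ hd)) h.2]

-- singleton infix is membership
theorem singleton_infix_iff (a : Char) (l : List Char) : [a] <:+: l ↔ a ∈ l := by
  constructor
  · intro h; exact h.mem List.mem_cons_self
  · intro h
    obtain ⟨s, t, rfl⟩ := List.append_of_mem h
    exact ⟨s, t, by simp⟩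

-- the three conjuncts, one by one (m > 0 throughout)

theorem conj_flag (m : Nat) (hm : 0 < m) :
    decide (6 ∈ dNat m) = PySem.Chars.isIn ['6'] (PySem.Int.toChars (m : Int)) := by
  rw [toChars_pos m hm, Bool.eq_iff_iff, decide_eq_true_iff, PySem.Chars.isIn_iff_infix,
    singleton_infix_iff]
  simp only [List.mem_map, List.mem_reverse]
  constructor
  · intro h; exact ⟨6, h, rfl⟩
  · rintro ⟨d, hd, hdc⟩
    rwa [← (digitChar_eq_six d (dNat_lt m d hd)).mp hdc]

theorem conj_sum (m : Nat) (hm : 0 < m) :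
    ((PySem.Int.toChars (m : Int)).map (fun c => ((c.toNat : Int) - 48))).sum =
      ((dNat m).map (fun (d : Nat) => (d : Int))).sum := by
  rw [toChars_pos m hm, List.map_map]
  have hcong : ∀ d ∈ (dNat m).reverse,
      ((fun c => ((c.toNat : Int) - 48)) ∘ Nat.digitChar) d = (fun (d : Nat) => (d : Int)) d := by
    intro d hd
    have := digitChar_toNat d (dNat_lt m d (List.mem_reverse.mp hd))
    simp [this]
  rw [List.map_congr_left hcong, List.map_reverse, List.sum_reverse]

theorem conj_pal (m : Nat) (hm : 0 < m) :
    ((dNat m).foldl (fun (r : Int) (d : Nat) => r * 10 + (d : Int)) 0 == (m : Int)) =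
      (PySem.Int.toChars (m : Int) == (PySem.Int.toChars (m : Int)).reverse) := by
  rw [toChars_pos m hm, Bool.eq_iff_iff, beq_iff_eq, beq_iff_eq,
    foldl_rev_eq, zero_mul, zero_add, ← List.map_reverse, List.reverse_reverse]
  constructor
  · intro h
    have hr : (dNat m).reverse = dNat m := by
      refine pvVal_inj _ _ (by simp) (fun d hd => dNat_lt m d (List.mem_reverse.mp hd))
        (dNat_lt m) ?_
      rw [h, dNat_val]
    rw [hr]
  · intro h
    have hr : (dNat m).reverse = dNat m :=
      map_digitChar_inj _ _ (fun d hd => dNat_lt m d (List.mem_reverse.mp hd)) (dNat_lt m) h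
    rw [hr, dNat_val]

-- ===== VERDICT (by name: the statement is the Claim_ definition above) =====
theorem check_spec : Claim_equal_check := by
  intro n _
  unfold Spec_check check check_alt
  by_cases hn : n ≤ 0
  · have : ¬ n > 0 := by omega
    rw [checkLoop_nonpos n this, if_pos hn]
    simp
  · obtain ⟨m, rfl⟩ : ∃ m : Nat, n = (m : Int) := ⟨n.toNat, by omega⟩
    have hm : 0 < m := by exact_mod_cast (by omega : (0 : Int) < (m : Int))
    rw [if_neg hn, checkLoop_eq m 0 0 false]
    simp only [Bool.false_or, zero_add]
    rw [conj_flag m hm, conj_sum m hm, conj_pal m hm]
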